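-- pv_equiv track=rewrite | github.com/bugsink/bugsink | performance/management/commands/pftest_search.py | x_for_parent
-- ===== SOURCE A (Python) =====
-- def x_for_parent(parents, last_parent_mentions, i, parent):
--     # not quite right, but "good enough" for readable output.
--
--     if parent == 0:
--         return ""
--
--     if last_parent_mentions[parents[parent]] > i:
--         s = "|  "
--     else:
--         s = "   "
--
--     return x_for_parent(parents, last_parent_mentions, i, parents[parent]) + s
-- ===== SOURCE B (Python) =====
-- def x_for_parent(parents, last_parent_mentions, i, parent):
--     # Phase 1: collect the chain of visited node indices.
--     chain = []
--     while parent != 0: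
--         chain.append(parent)
--         parent = parents[parent]
--     # Phase 2: map each node (topmost ancestor first) to its segment and join.
--     return "".join(
--         "|  " if last_parent_mentions[parents[p]] > i else "   "
--         for p in reversed(chain)
--     )
-- ===== Notes on version B (the rewrite author's own statement) =====
-- stated objective: idiomatic
-- what changed: A's recursion that rebuilds the prefix string at every level is replaced by two separate phases: an iterative walk that collects the chain of visited node indices, then a single map+join over the reversed chain that turns each node into its segment.
import Mathlib
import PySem

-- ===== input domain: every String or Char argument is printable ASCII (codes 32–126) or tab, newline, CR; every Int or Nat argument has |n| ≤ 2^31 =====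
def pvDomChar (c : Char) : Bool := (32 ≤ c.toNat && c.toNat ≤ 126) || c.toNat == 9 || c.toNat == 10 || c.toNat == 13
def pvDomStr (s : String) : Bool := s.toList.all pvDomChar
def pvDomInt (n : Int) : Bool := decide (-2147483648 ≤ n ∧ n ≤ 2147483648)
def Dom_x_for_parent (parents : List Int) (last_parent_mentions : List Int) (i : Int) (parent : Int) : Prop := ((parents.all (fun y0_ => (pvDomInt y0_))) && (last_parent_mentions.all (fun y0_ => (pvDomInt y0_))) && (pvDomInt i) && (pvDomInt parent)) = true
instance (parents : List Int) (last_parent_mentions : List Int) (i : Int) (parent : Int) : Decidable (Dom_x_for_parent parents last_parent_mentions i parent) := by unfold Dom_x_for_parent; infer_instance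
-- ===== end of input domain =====

-- B replaces A's recursion (which rebuilds the string at every level) by two phases:
-- collect the chain of visited node indices, then map each node to its segment and
-- join; objective: idiomatic.

-- ===== PORT A =====
-- A's recursion on `parent` need not terminate in Python (cyclic parent chains raise
-- RecursionError); the Nat fuel only makes it structural — under Pre_ it is never
-- exhausted (a 0-reaching chain visits each normalized index at most once, so it has
-- at most parents.length + 1 nodes).
def xA_go (parents : List Int) (last_parent_mentions : List Int) (i : Int) (parent : Int) : Nat → String
  | 0 => ""
  | fuel + 1 =>
    if parent = 0 then ""
    else
      match PySem.List.pyGet? parents parent with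
      | none => ""   -- IndexError in Python; excluded by Pre_
      | some p =>
        let s :=
          match PySem.List.pyGet? last_parent_mentions p with
          | none => ""   -- IndexError in Python; excluded by Pre_
          | some v => if v > i then "|  " else "   "
        xA_go parents last_parent_mentions i p fuel ++ s

def x_for_parent (parents : List Int) (last_parent_mentions : List Int) (i : Int) (parent : Int) : String :=
  xA_go parents last_parent_mentions i parent (parents.length + 1)

-- ===== PORT B =====
-- phase 1 of Source B: the while loop collecting visited node indices (same fuel remark)
def xB_chain (parents : List Int) (parent : Int) (chain : List Int) : Nat → List Int
  | 0 => chain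
  | fuel + 1 =>
    if parent = 0 then chain
    else
      match PySem.List.pyGet? parents parent with
      | none => chain ++ [parent]   -- IndexError in Python; excluded by Pre_
      | some p => xB_chain parents p (chain ++ [parent]) fuel

-- phase 2 of Source B: one node of the reversed chain → its segment
def xB_seg (parents : List Int) (last_parent_mentions : List Int) (i : Int) (p : Int) : String :=
  match PySem.List.pyGet? parents p with
  | none => ""   -- IndexError in Python; unreachable under Pre_
  | some q =>
    match PySem.List.pyGet? last_parent_mentions q with
    | none => ""   -- IndexError in Python; unreachable under Pre_
    | some v => if v > i then "|  " else "   "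

def x_for_parent_alt (parents : List Int) (last_parent_mentions : List Int) (i : Int) (parent : Int) : String :=
  String.join (((xB_chain parents parent [] (parents.length + 1)).reverse).map
    (xB_seg parents last_parent_mentions i))

-- ===== PRECONDITION & SPEC =====
-- Pre_ holds exactly where Python A RETURNS: 0 appears among the first
-- parents.length + 1 iterated ancestors of `parent`, and every list access along the
-- way is in range. Outside it A raises (IndexError on an out-of-range access, or
-- RecursionError on a chain that never reaches 0 — such a chain must revisit a
-- normalized index and therefore cycles forever). Nothing on which A returns is
-- excluded.
def pvAncStep (parents : List Int) (q : Int) : Int :=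
  (PySem.List.pyGet? parents q).getD q

def Pre_x_for_parent (parents : List Int) (last_parent_mentions : List Int) (i : Int) (parent : Int) : Prop :=
  ∃ n < parents.length + 1,
    (pvAncStep parents)^[n] parent = 0 ∧
    ∀ m < n, ∃ q, PySem.List.pyGet? parents ((pvAncStep parents)^[m] parent) = some q ∧
      (PySem.List.pyGet? last_parent_mentions q).isSome = true
instance (parents : List Int) (last_parent_mentions : List Int) (i : Int) (parent : Int) : Decidable (Pre_x_for_parent parents last_parent_mentions i parent) := by
  unfold Pre_x_for_parent; infer_instance

def pvWitness_x_for_parent : List Int × List Int × Int × Int := ([0, 0, 1], [5, 5, 5], 0, 2)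

def Spec_x_for_parent (parents : List Int) (last_parent_mentions : List Int) (i : Int) (parent : Int) (out : String) : Prop := out = x_for_parent_alt parents last_parent_mentions i parent
instance (parents : List Int) (last_parent_mentions : List Int) (i : Int) (parent : Int) (out : String) : Decidable (Spec_x_for_parent parents last_parent_mentions i parent out) := by unfold Spec_x_for_parent; infer_instance

-- ===== CLAIM (what is proved, stated in full; the proofs are below) =====
def Claim_equal_x_for_parent : Prop := ∀ (parents : List Int) (last_parent_mentions : List Int) (i : Int) (parent : Int), Dom_x_for_parent parents last_parent_mentions i parent → Pre_x_for_parent parents last_parent_mentions i parent → Spec_x_for_parent parents last_parent_mentions i parent (x_for_parent parents last_parent_mentions i parent)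

-- ===== LEMMAS AND PROOFS =====

-- proof-side helper: Boolean transcription of Pre_'s chain condition
def pvChainOk (parents last_parent_mentions : List Int) : Int → Nat → Bool
  | _, 0 => false
  | p, fuel + 1 =>
    if p = 0 then true
    else
      match PySem.List.pyGet? parents p with
      | none => false
      | some q =>
        (PySem.List.pyGet? last_parent_mentions q).isSome
          && pvChainOk parents last_parent_mentions q fuel

theorem pre_imp_chainOk (parents last_parent_mentions : List Int) :
    ∀ (fuel : Nat) (parent : Int),
      (∃ n < fuel, (pvAncStep parents)^[n] parent = 0 ∧
        ∀ m < n, ∃ q, PySem.List.pyGet? parents ((pvAncStep parents)^[m] parent) = some q ∧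
          (PySem.List.pyGet? last_parent_mentions q).isSome = true) →
      pvChainOk parents last_parent_mentions parent fuel = true := by
  intro fuel
  induction fuel with
  | zero => intro parent h; obtain ⟨n, hn, _⟩ := h; omega
  | succ f ih =>
    intro parent ⟨n, hn, h0, hvalid⟩
    by_cases hp : parent = 0
    · simp [pvChainOk, hp]
    · cases n with
      | zero => simp only [Function.iterate_zero, id_eq] at h0; exact absurd h0 hp
      | succ m =>
        obtain ⟨q, hq, hlpm⟩ := hvalid 0 (Nat.succ_pos m)
        simp only [Function.iterate_zero, id_eq] at hq
        have hstep : pvAncStep parents parent = q := by simp [pvAncStep, hq]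
        have hrest : ∃ n' < f, (pvAncStep parents)^[n'] q = 0 ∧
            ∀ m' < n', ∃ q', PySem.List.pyGet? parents ((pvAncStep parents)^[m'] q) = some q' ∧
              (PySem.List.pyGet? last_parent_mentions q').isSome = true := by
          refine ⟨m, by omega, ?_, ?_⟩
          · rw [← hstep, ← Function.iterate_succ_apply]; exact h0
          · intro m' hm'
            have := hvalid (m' + 1) (by omega)
            rwa [Function.iterate_succ_apply, hstep] at this
        simp only [pvChainOk, hp, if_false, hq, hlpm, Bool.true_and]
        exact ih q hrest

theorem xB_chain_acc (parents : List Int) :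
    ∀ (fuel : Nat) (parent : Int) (chain : List Int),
      xB_chain parents parent chain fuel = chain ++ xB_chain parents parent [] fuel := by
  intro fuel
  induction fuel with
  | zero => intro parent chain; simp [xB_chain]
  | succ f ih =>
    intro parent chain
    simp only [xB_chain]
    by_cases h0 : parent = 0
    · simp [h0]
    · simp only [h0, if_false]
      cases hget : PySem.List.pyGet? parents parent with
      | none => simp
      | some p =>
        simp only []
        rw [ih p, ih p (_ ++ _)]; simp

theorem go_eq (parents last_parent_mentions : List Int) (i : Int) :
    ∀ (fuel : Nat) (parent : Int),
      pvChainOk parents last_parent_mentions parent fuel = true →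
      xA_go parents last_parent_mentions i parent fuel
        = String.join (((xB_chain parents parent [] fuel).reverse).map
            (xB_seg parents last_parent_mentions i)) := by
  intro fuel
  induction fuel with
  | zero => intro parent h; simp [pvChainOk] at h
  | succ f ih =>
    intro parent h
    simp only [xA_go, xB_chain]
    by_cases h0 : parent = 0
    · simp [h0, String.join]
    · simp only [h0, if_false]
      simp only [pvChainOk, h0, if_false] at h
      cases hget : PySem.List.pyGet? parents parent with
      | none => rw [hget] at h; simp at h
      | some p =>
        rw [hget] at h
        simp only [Bool.and_eq_true] at h
        obtain ⟨hsome, hchain⟩ := h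
        obtain ⟨v, hv⟩ := Option.isSome_iff_exists.mp hsome
        simp only []
        rw [xB_chain_acc, ih p hchain]
        simp [String.join, List.foldl_append, xB_seg, hget, hv]

-- ===== VERDICT (by name: the statement is the Claim_ definition above) =====
theorem x_for_parent_spec : Claim_equal_x_for_parent := by
  intro parents last_parent_mentions i parent _ hpre
  unfold Spec_x_for_parent x_for_parent x_for_parent_alt
  exact go_eq parents last_parent_mentions i (parents.length + 1) parent
    (pre_imp_chainOk parents last_parent_mentions (parents.length + 1) parent hpre)
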